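-- pv_equiv track=rewrite | github.com/Sulphite05/MetaHackerCup2024 | Practice Round/Line Of Delivery 2/main.py | line_of_delivery
-- ===== SOURCE A (Python) =====
-- def line_of_delivery(G, lst):
--     for i in range(1, len(lst)):
--         if lst[i] >= lst[i-1]:
--             num = lst[i] - lst[i-1] + 1
--             lst[i] = lst[i-1] - 1
--             j = i - 1
--             while num > 0:
--                 if j == 0 or lst[j] + num < lst[j-1]:
--                     lst[j] += num
--                     break
--
--                 diff = lst[j-1] - lst[j] - 1
--
--                 if diff > 0:
--                     lst[j] = lst[j - 1] - 1
--                     num -= diff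
--
--                 j -= 1
--
--     left, right = 0, len(lst) - 1
--     while left < right - 1:
--         mid = (left + right)//2
--         if lst[mid] == G:
--             return mid+1, 0
--         if G > lst[mid]:
--             right = mid
--         else:
--             left = mid
--
--     ans = left if abs(lst[left] - G) <= abs(lst[right] - G) else right
--     return ans + 1, abs(lst[ans] - G)
-- ===== SOURCE B (Python) =====
-- def line_of_delivery(G, lst):
--     # Key fact: adding the index to each settled position turns the collision
--     # compaction into plain descending sorting of (value + index).
--     ys = sorted((v + k for k, v in enumerate(lst)), reverse=True)
--     best_i = 0
--     best_d = abs(ys[0] - G)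
--     for k in range(1, len(ys)):
--         d = abs(ys[k] - k - G)
--         if d < best_d:
--             best_i, best_d = k, d
--     return best_i + 1, best_d
-- ===== Notes on version B (the rewrite author's own statement) =====
-- stated objective: faster
-- what changed: Replaces the in-place O(n^2) collision cascade with a closed characterization - adding each stone's index turns the compaction into a descending sort of (value+index) - followed by a single linear argmin scan instead of the hand-rolled binary search.
-- outside the precondition, e.g. on line_of_delivery(3, []): A raises IndexError, B raises IndexError
import Mathlib
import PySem

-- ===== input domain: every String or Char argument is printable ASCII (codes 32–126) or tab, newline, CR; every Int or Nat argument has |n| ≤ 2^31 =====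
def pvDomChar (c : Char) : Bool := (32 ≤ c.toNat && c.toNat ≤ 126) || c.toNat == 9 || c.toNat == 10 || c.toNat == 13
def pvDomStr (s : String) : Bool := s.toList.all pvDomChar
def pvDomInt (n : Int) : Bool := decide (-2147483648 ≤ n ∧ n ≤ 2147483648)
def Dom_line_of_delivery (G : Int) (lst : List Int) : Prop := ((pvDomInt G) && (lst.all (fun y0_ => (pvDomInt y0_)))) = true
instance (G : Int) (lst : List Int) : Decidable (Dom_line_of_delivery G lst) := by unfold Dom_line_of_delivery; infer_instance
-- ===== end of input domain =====

-- B replaces A's in-place quadratic collision cascade by sorting (value+index) descending and a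
-- linear closest-index scan; A mutates its list argument in place, B does not — only the RETURN
-- value is claimed equal here.

-- ===== PORT A =====

-- inner `while num > 0` loop of A: carries the surplus `num` leftwards from index j
def lodInner (a : List Int) (j : Nat) (num : Int) : List Int :=
  if 0 < num then
    if j = 0 ∨ a.getD j 0 + num < a.getD (j - 1) 0 then
      a.set j (a.getD j 0 + num)
    else
      let diff := a.getD (j - 1) 0 - a.getD j 0 - 1
      if 0 < diff then lodInner (a.set j (a.getD (j - 1) 0 - 1)) (j - 1) (num - diff)
      else lodInner a (j - 1) num
  else a
termination_by j
decreasing_by all_goals (rename_i h _; simp at h; omega)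

-- outer `for i in range(1, len(lst))` loop of A
def lodResolve (lst : List Int) : List Int :=
  (List.range' 1 (lst.length - 1)).foldl
    (fun a i =>
      if a.getD (i - 1) 0 ≤ a.getD i 0 then
        lodInner (a.set i (a.getD (i - 1) 0 - 1)) (i - 1) (a.getD i 0 - a.getD (i - 1) 0 + 1)
      else a)
    lst

lemma lodSearch_mid (left right : Int) (h : left < right - 1) :
    left < PySem.Int.floordiv (left + right) 2 ∧ PySem.Int.floordiv (left + right) 2 < right := by
  constructor
  · have := (PySem.Int.le_floordiv_iff_mul_le (a := left + right) (b := 2) (q := left + 1) (by omega)).mpr (by omega)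
    omega
  · exact (PySem.Int.floordiv_lt_iff_lt_mul (a := left + right) (b := 2) (q := right) (by omega)).mpr (by omega)

-- final `while left < right - 1` binary search of A
def lodSearch (a : List Int) (G : Int) (left right : Int) : Int × Int :=
  if h : left < right - 1 then
    let mid := PySem.Int.floordiv (left + right) 2
    if a.getD mid.toNat 0 = G then (mid + 1, 0)
    else if a.getD mid.toNat 0 < G then lodSearch a G left mid
    else lodSearch a G mid right
  else
    let ans := if |a.getD left.toNat 0 - G| ≤ |a.getD right.toNat 0 - G| then left else right
    (ans + 1, |a.getD ans.toNat 0 - G|)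
termination_by (right - left).toNat
decreasing_by
  · have := lodSearch_mid left right h; omega
  · have := lodSearch_mid left right h; omega

def line_of_delivery (G : Int) (lst : List Int) : Int × Int :=
  lodSearch (lodResolve lst) G 0 ((lst.length : Int) - 1)

-- ===== PORT B =====

def line_of_delivery_alt (G : Int) (lst : List Int) : Int × Int :=
  let ys := PySem.List.sorted (lst.zipIdx.map (fun p => p.1 + (p.2 : Int))) (fun x => x) true
  match ys with
  | [] => (1, 0)  -- unreachable: Pre_ excludes lst = [] (Source B raises IndexError there, like A)
  | y0 :: _ =>
    let s := (List.range' 1 (ys.length - 1)).foldl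
      (fun (s : Int × Int) k =>
        let d := |ys.getD k 0 - (k : Int) - G|
        if d < s.2 then ((k : Int), d) else s)
      (0, |y0 - G|)
    (s.1 + 1, s.2)

-- ===== PRECONDITION & SPEC =====
-- Pre_ excludes only the empty list, on which both A and B raise IndexError.
def Pre_line_of_delivery (G : Int) (lst : List Int) : Prop := lst ≠ []
instance (G : Int) (lst : List Int) : Decidable (Pre_line_of_delivery G lst) := by
  unfold Pre_line_of_delivery; infer_instance

def pvWitness_line_of_delivery : Int × List Int := (5, [3, 7, 2])

def Spec_line_of_delivery (G : Int) (lst : List Int) (out : Int × Int) : Prop := out = line_of_delivery_alt G lst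
instance (G : Int) (lst : List Int) (out : Int × Int) : Decidable (Spec_line_of_delivery G lst out) := by
  unfold Spec_line_of_delivery; infer_instance

-- ===== CLAIM (what is proved, stated in full; the proofs are below) =====
def Claim_equal_line_of_delivery : Prop := ∀ (G : Int) (lst : List Int), Dom_line_of_delivery G lst → Pre_line_of_delivery G lst → Spec_line_of_delivery G lst (line_of_delivery G lst)

-- ===== LEMMAS AND PROOFS =====

def yofF (a : List Int) (n : Nat) : List Int := (a.zipIdx n).map (fun p => p.1 + (p.2 : Int))

lemma yofF_nil (n : Nat) : yofF [] n = [] := rfl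
lemma yofF_cons (x : Int) (t : List Int) (n : Nat) : yofF (x :: t) n = (x + n) :: yofF t (n+1) := by
  simp [yofF]

lemma yofF_length (a : List Int) (n : Nat) : (yofF a n).length = a.length := by
  simp [yofF]

lemma yofF_getD (a : List Int) (n k : Nat) (h : k < a.length) :
    (yofF a n).getD k 0 = a.getD k 0 + (n + k : Nat) := by
  induction a generalizing n k with
  | nil => simp at h
  | cons x t ih =>
    cases k with
    | zero => simp [yofF_cons]
    | succ k =>
      simp only [yofF_cons, List.getD_cons_succ]
      rw [ih n.succ k (by simpa using h)]
      push_cast; ring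

lemma yofF_set (a : List Int) (n j : Nat) (v : Int) :
    yofF (a.set j v) n = (yofF a n).set j (v + (n + j : Nat)) := by
  induction a generalizing n j with
  | nil => simp [yofF_nil]
  | cons x t ih =>
    cases j with
    | zero => simp [yofF_cons]
    | succ j =>
      simp only [List.set_cons_succ, yofF_cons, ih]
      congr 2
      push_cast; ring

lemma yofF_append (a b : List Int) (n : Nat) :
    yofF (a ++ b) n = yofF a n ++ yofF b (n + a.length) := by
  induction a generalizing n with
  | nil => simp [yofF_nil]
  | cons x t ih => simp [yofF_cons, ih]; ring_nf

lemma perm_set_swap : ∀ (Y : List Int) (j : Nat), j + 1 < Y.length → ∀ v : Int,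
    ((Y.set (j+1) (Y.getD j 0)).set j v).Perm (Y.set (j+1) v) := by
  intro Y j
  induction j generalizing Y with
  | zero =>
    intro h v
    match Y, h with
    | a :: b :: t, _ => simpa using List.Perm.swap a v t
  | succ j ih =>
    intro h v
    match Y, h with
    | a :: t, h =>
      simpa using (ih t (by simpa using h) v)

lemma perm_set_eq : ∀ (Y : List Int) (j : Nat), j + 1 < Y.length →
    Y.getD j 0 = Y.getD (j+1) 0 → ∀ w : Int,
    (Y.set j w).Perm (Y.set (j+1) w) := by
  intro Y j
  induction j generalizing Y with
  | zero =>
    intro h he w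
    match Y, h with
    | a :: b :: t, _ =>
      simp at he; subst he
      simpa using (List.Perm.swap w a t).symm
  | succ j ih =>
    intro h he w
    match Y, h with
    | a :: t, h =>
      simpa using ih t (by simpa using h) (by simpa using he) w

lemma getD_take (a : List Int) (m k : Nat) (h : k < m) :
    (a.take m).getD k 0 = a.getD k 0 := by
  induction a generalizing m k with
  | nil => simp
  | cons x t ih =>
    cases m with
    | zero => omega
    | succ m =>
      cases k with
      | zero => simp
      | succ k => simpa using ih m k (by omega)

lemma getD_set_self (a : List Int) (j : Nat) (v : Int) (h : j < a.length) :
    (a.set j v).getD j 0 = v := by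
  rw [List.getD_eq_getElem _ _ (by simpa using h)]
  simp [List.getElem_set_self]

lemma getD_set_ne (a : List Int) (j : Nat) (v : Int) (k : Nat) (h : k ≠ j) :
    (a.set j v).getD k 0 = a.getD k 0 := by
  by_cases hk : k < a.length
  · rw [List.getD_eq_getElem _ _ (by simpa using hk), List.getD_eq_getElem _ _ hk]
    exact List.getElem_set_ne (Ne.symm h) _
  · rw [List.getD_eq_default _ _ (by simpa using (Nat.le_of_not_lt hk)),
        List.getD_eq_default _ _ (by simpa using (Nat.le_of_not_lt hk))]

lemma yof_take_set (l : List Int) (i : Nat) (v : Int) (m : Nat) :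
    yofF ((l.set i v).take m) 0 = (yofF (l.take m) 0).set i (v + (i : Int)) := by
  rw [List.take_set, yofF_set]
  norm_num

lemma lodInner_spec (J : Nat) : ∀ (j : Nat) (a : List Int) (num : Int),
    0 < num → j ≤ J → J < a.length →
    (∀ k, k < J → a.getD (k+1) 0 + ((k : Int)+1) ≤ a.getD k 0 + k) →
    (lodInner a j num).length = a.length ∧
    (∀ k, J < k → (lodInner a j num).getD k 0 = a.getD k 0) ∧
    (∀ k, k < J → (lodInner a j num).getD (k+1) 0 + ((k : Int)+1) ≤ (lodInner a j num).getD k 0 + k) ∧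
    (yofF ((lodInner a j num).take (J+1)) 0).Perm (yofF ((a.set j (a.getD j 0 + num)).take (J+1)) 0) := by
  intro j
  induction j with
  | zero =>
    intro a num hnum hjJ hJ hsort
    rw [lodInner, if_pos hnum, if_pos (Or.inl rfl)]
    refine ⟨by simp, ?_, ?_, List.Perm.refl _⟩
    · intro k hk
      exact getD_set_ne a 0 _ k (by omega)
    · intro k hk
      rcases Nat.eq_zero_or_pos k with hk0 | hk0
      · subst hk0
        rw [getD_set_ne a 0 _ 1 (by omega), getD_set_self a 0 _ (by omega)]
        have h0 := hsort 0 hk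
        norm_num at h0 ⊢
        omega
      · rw [getD_set_ne a 0 _ (k+1) (by omega), getD_set_ne a 0 _ k (by omega)]
        exact hsort k hk
  | succ j ih =>
    intro a num hnum hjJ hJ hsort
    by_cases hbr : a.getD (j+1) 0 + num < a.getD (j+1-1) 0
    · -- break branch
      rw [lodInner, if_pos hnum, if_pos (Or.inr hbr)]
      refine ⟨by simp, ?_, ?_, List.Perm.refl _⟩
      · intro k hk
        exact getD_set_ne a (j+1) _ k (by omega)
      · intro k hk
        simp only [Nat.add_sub_cancel] at hbr
        by_cases hk1 : k = j+1
        · subst hk1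
          rw [getD_set_ne a (j+1) _ (j+1+1) (by omega), getD_set_self a (j+1) _ (by omega)]
          have := hsort (j+1) hk
          push_cast at *
          omega
        · by_cases hk2 : k + 1 = j + 1
          · have hkj : k = j := by omega
            subst hkj
            rw [getD_set_self a (k+1) _ (by omega), getD_set_ne a (k+1) _ k (by omega)]
            push_cast
            omega
          · rw [getD_set_ne a (j+1) _ (k+1) (by omega), getD_set_ne a (j+1) _ k (by omega)]
            exact hsort k hk
    · -- carry branches
      have hne : ¬ ((j+1) = 0 ∨ a.getD (j+1) 0 + num < a.getD (j+1-1) 0) := by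
        push_neg
        exact ⟨by omega, by simpa using hbr⟩
      rw [lodInner, if_neg hne, if_pos hnum]
      have hsj : a.getD (j+1) 0 + ((j:Int)+1) ≤ a.getD j 0 + j := hsort j (by omega)
      simp only [Nat.add_sub_cancel] at hbr ⊢
      have hYlen : (yofF (a.take (J+1)) 0).length = J + 1 := by
        rw [yofF_length, List.length_take]
        omega
      have hYj : (yofF (a.take (J+1)) 0).getD j 0 = a.getD j 0 + (j : Int) := by
        rw [yofF_getD _ _ _ (by rw [List.length_take]; omega), getD_take _ _ _ (by omega)]
        norm_num
      have hYj1 : (yofF (a.take (J+1)) 0).getD (j+1) 0 = a.getD (j+1) 0 + ((j : Int)+1) := by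
        rw [yofF_getD _ _ _ (by rw [List.length_take]; omega), getD_take _ _ _ (by omega)]
        push_cast
        ring
      by_cases hd : 0 < a.getD j 0 - a.getD (j+1) 0 - 1
      · rw [if_pos hd]
        have hnum' : 0 < num - (a.getD j 0 - a.getD (j+1) 0 - 1) := by omega
        have hlen1 : J < (a.set (j+1) (a.getD j 0 - 1)).length := by
          simpa using hJ
        have hsort1 : ∀ k, k < J →
            (a.set (j+1) (a.getD j 0 - 1)).getD (k+1) 0 + ((k : Int)+1) ≤
            (a.set (j+1) (a.getD j 0 - 1)).getD k 0 + k := by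
          intro k hk
          by_cases hk1 : k = j+1
          · subst hk1
            rw [getD_set_ne a (j+1) _ (j+1+1) (by omega), getD_set_self a (j+1) _ (by omega)]
            have h2 := hsort (j+1) hk
            push_cast at *
            omega
          · by_cases hk2 : k = j
            · subst hk2
              rw [getD_set_self a (k+1) _ (by omega), getD_set_ne a (k+1) _ k (by omega)]
              push_cast
              omega
            · rw [getD_set_ne a (j+1) _ (k+1) (by omega), getD_set_ne a (j+1) _ k (by omega)]
              exact hsort k hk
        obtain ⟨ihlen, ihup, ihsrt, ihperm⟩ :=
          ih (a.set (j+1) (a.getD j 0 - 1)) (num - (a.getD j 0 - a.getD (j+1) 0 - 1))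
            hnum' (by omega) hlen1 hsort1
        refine ⟨by simpa using ihlen, ?_, ihsrt, ?_⟩
        · intro k hk
          rw [ihup k hk, getD_set_ne a (j+1) _ k (by omega)]
        · refine ihperm.trans ?_
          rw [yof_take_set, yof_take_set, yof_take_set,
              getD_set_ne a (j+1) _ j (by omega)]
          have e1 : a.getD j 0 - 1 + ((j:Int)+1) = (yofF (a.take (J+1)) 0).getD j 0 := by
            rw [hYj]; ring
          have e2 : a.getD j 0 + (num - (a.getD j 0 - a.getD (j+1) 0 - 1)) + (j : Int) =
              (yofF (a.take (J+1)) 0).getD (j+1) 0 + num := by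
            rw [hYj1]; ring
          have e3 : a.getD (j+1) 0 + num + ((j:Int)+1) =
              (yofF (a.take (J+1)) 0).getD (j+1) 0 + num := by
            rw [hYj1]; ring
          push_cast
          rw [e1, e2, e3]
          exact perm_set_swap _ j (by omega) _
      · rw [if_neg hd]
        have hd0 : a.getD j 0 - a.getD (j+1) 0 - 1 = 0 := by
          push_cast at hsj
          omega
        obtain ⟨ihlen, ihup, ihsrt, ihperm⟩ := ih a num hnum (by omega) hJ hsort
        refine ⟨ihlen, ihup, ihsrt, ?_⟩
        refine ihperm.trans ?_
        rw [yof_take_set, yof_take_set]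
        have e2 : a.getD j 0 + num + (j : Int) = a.getD (j+1) 0 + num + ((j:Int)+1) := by
          omega
        have heq : (yofF (a.take (J+1)) 0).getD j 0 = (yofF (a.take (J+1)) 0).getD (j+1) 0 := by
          rw [hYj, hYj1]
          omega
        push_cast
        rw [e2]
        exact perm_set_eq _ j (by omega) heq _

lemma take_succ_getD (l : List Int) (n : Nat) (h : n < l.length) :
    l.take (n+1) = l.take n ++ [l.getD n 0] := by
  rw [List.take_succ_eq_append_getElem h, List.getD_eq_getElem _ _ h]

lemma set_getD_self (l : List Int) (j : Nat) (h : j < l.length) :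
    l.set j (l.getD j 0) = l := by
  rw [List.getD_eq_getElem _ _ h]
  exact List.set_getElem_self h

lemma lodResolve_aux (lst : List Int) : ∀ m : Nat, m < lst.length →
    ((List.range' 1 m).foldl
      (fun a i =>
        if a.getD (i - 1) 0 ≤ a.getD i 0 then
          lodInner (a.set i (a.getD (i - 1) 0 - 1)) (i - 1) (a.getD i 0 - a.getD (i - 1) 0 + 1)
        else a)
      lst).length = lst.length ∧
    (∀ k, m < k → ((List.range' 1 m).foldl
      (fun a i =>
        if a.getD (i - 1) 0 ≤ a.getD i 0 then
          lodInner (a.set i (a.getD (i - 1) 0 - 1)) (i - 1) (a.getD i 0 - a.getD (i - 1) 0 + 1)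
        else a)
      lst).getD k 0 = lst.getD k 0) ∧
    (∀ k, k < m → ((List.range' 1 m).foldl
      (fun a i =>
        if a.getD (i - 1) 0 ≤ a.getD i 0 then
          lodInner (a.set i (a.getD (i - 1) 0 - 1)) (i - 1) (a.getD i 0 - a.getD (i - 1) 0 + 1)
        else a)
      lst).getD (k+1) 0 + ((k : Int)+1) ≤ ((List.range' 1 m).foldl
      (fun a i =>
        if a.getD (i - 1) 0 ≤ a.getD i 0 then
          lodInner (a.set i (a.getD (i - 1) 0 - 1)) (i - 1) (a.getD i 0 - a.getD (i - 1) 0 + 1)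
        else a)
      lst).getD k 0 + k) ∧
    (yofF (((List.range' 1 m).foldl
      (fun a i =>
        if a.getD (i - 1) 0 ≤ a.getD i 0 then
          lodInner (a.set i (a.getD (i - 1) 0 - 1)) (i - 1) (a.getD i 0 - a.getD (i - 1) 0 + 1)
        else a)
      lst).take (m+1)) 0).Perm (yofF (lst.take (m+1)) 0) := by
  intro m
  induction m with
  | zero =>
    intro _
    exact ⟨rfl, fun k _ => rfl, fun k hk => absurd hk (by omega), List.Perm.refl _⟩
  | succ m ih =>
    intro hm
    obtain ⟨ih1, ih2, ih3, ih4⟩ := ih (by omega)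
    set F := (fun (a : List Int) (i : Nat) =>
        if a.getD (i - 1) 0 ≤ a.getD i 0 then
          lodInner (a.set i (a.getD (i - 1) 0 - 1)) (i - 1) (a.getD i 0 - a.getD (i - 1) 0 + 1)
        else a) with hF
    set a := (List.range' 1 m).foldl F lst with ha
    have hfold : (List.range' 1 (m+1)).foldl F lst = F a (1+m) := by
      rw [List.range'_1_concat, List.foldl_append]
      rfl
    have h1m : (1 : Nat) + m - 1 = m := by omega
    have ham1 : a.getD (1+m) 0 = lst.getD (m+1) 0 := by
      rw [ih2 (1+m) (by omega)]
      norm_num [Nat.add_comm]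
    have hlstdec : yofF (lst.take (m+1+1)) 0 =
        yofF (lst.take (m+1)) 0 ++ [lst.getD (m+1) 0 + ((m : Int)+1)] := by
      rw [take_succ_getD lst (m+1) hm, yofF_append]
      have hl0 : (lst.take (m+1)).length = m+1 := by
        rw [List.length_take]; omega
      rw [hl0, yofF_cons, yofF_nil]
      have hc2 : ((0 + (m+1) : Nat) : Int) = (m : Int) + 1 := by push_cast; ring
      rw [hc2]
    by_cases hcase : a.getD (1+m-1) 0 ≤ a.getD (1+m) 0
    · rw [hfold]
      rw [hF]
      simp only []
      rw [if_pos hcase]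
      rw [h1m] at hcase ⊢
      have hlen1 : m + 1 < (a.set (1+m) (a.getD m 0 - 1)).length := by
        simp only [List.length_set]
        omega
      have hsort1 : ∀ k, k < m + 1 →
          (a.set (1+m) (a.getD m 0 - 1)).getD (k+1) 0 + ((k : Int)+1) ≤
          (a.set (1+m) (a.getD m 0 - 1)).getD k 0 + k := by
        intro k hk
        by_cases hkm : k = m
        · subst hkm
          have hsw : k + 1 = 1 + k := by omega
          rw [hsw, getD_set_self a (1+k) _ (by omega), getD_set_ne a (1+k) _ k (by omega)]
          omega
        · rw [getD_set_ne a (1+m) _ (k+1) (by omega), getD_set_ne a (1+m) _ k (by omega)]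
          exact ih3 k (by omega)
      obtain ⟨s1, s2, s3, s4⟩ := lodInner_spec (m+1) m (a.set (1+m) (a.getD m 0 - 1))
        (a.getD (1+m) 0 - a.getD m 0 + 1) (by omega) (by omega) hlen1 hsort1
      refine ⟨?_, ?_, s3, ?_⟩
      · rw [s1]; simpa using ih1
      · intro k hk
        rw [s2 k (by omega), getD_set_ne a (1+m) _ k (by omega), ih2 k (by omega)]
      · refine s4.trans ?_
        rw [getD_set_ne a (1+m) _ m (by omega)]
        rw [yof_take_set, yof_take_set]
        have hYlen : (yofF (a.take (m+1+1)) 0).length = m+2 := by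
          rw [yofF_length, List.length_take]
          omega
        have hYm : (yofF (a.take (m+1+1)) 0).getD m 0 = a.getD m 0 + (m : Int) := by
          rw [yofF_getD _ _ _ (by rw [List.length_take]; omega), getD_take _ _ _ (by omega)]
          norm_num
        have hYm1 : (yofF (a.take (m+1+1)) 0).getD (1+m) 0 = a.getD (1+m) 0 + ((m : Int)+1) := by
          rw [yofF_getD _ _ _ (by rw [List.length_take]; omega), getD_take _ _ _ (by omega)]
          push_cast
          ring
        have e1 : a.getD m 0 - 1 + ((1:Int)+m) = (yofF (a.take (m+1+1)) 0).getD m 0 := by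
          rw [hYm]; ring
        have e2 : a.getD m 0 + (a.getD (1+m) 0 - a.getD m 0 + 1) + (m : Int) =
            (yofF (a.take (m+1+1)) 0).getD (1+m) 0 := by
          rw [hYm1]; ring
        push_cast
        rw [e1, e2]
        have hcomm : 1 + m = m + 1 := by omega
        rw [hcomm]
        refine (perm_set_swap (yofF (a.take (m+1+1)) 0) m (by omega) _).trans ?_
        rw [set_getD_self _ (m+1) (by omega)]
        have hadec : yofF (a.take (m+1+1)) 0 =
            yofF (a.take (m+1)) 0 ++ [lst.getD (m+1) 0 + ((m : Int)+1)] := by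
          rw [take_succ_getD a (m+1) (by omega), yofF_append]
          have hl : (a.take (m+1)).length = m+1 := by
            rw [List.length_take]; omega
          have hv : a.getD (m+1) 0 = lst.getD (m+1) 0 := by rw [ih2 (m+1) (by omega)]
          rw [hl, yofF_cons, yofF_nil, hv]
          have hc2 : ((0 + (m+1) : Nat) : Int) = (m : Int) + 1 := by push_cast; ring
          rw [hc2]
        rw [hadec, hlstdec]
        exact ih4.append (List.Perm.refl _)
    · rw [hfold, hF]
      simp only []
      rw [if_neg hcase]
      rw [h1m] at hcase
      refine ⟨ih1, ?_, ?_, ?_⟩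
      · intro k hk
        exact ih2 k (by omega)
      · intro k hk
        by_cases hkm : k = m
        · subst hkm
          have h1 : a.getD (k+1) 0 = lst.getD (k+1) 0 := ih2 (k+1) (by omega)
          omega
        · exact ih3 k (by omega)
      · have hadec : yofF (a.take (m+1+1)) 0 =
            yofF (a.take (m+1)) 0 ++ [lst.getD (m+1) 0 + ((m : Int)+1)] := by
          rw [take_succ_getD a (m+1) (by omega), yofF_append]
          have hl : (a.take (m+1)).length = m+1 := by
            rw [List.length_take]; omega
          have hv : a.getD (m+1) 0 = lst.getD (m+1) 0 := ih2 (m+1) (by omega)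
          rw [hl, yofF_cons, yofF_nil, hv]
          have hc2 : ((0 + (m+1) : Nat) : Int) = (m : Int) + 1 := by push_cast; ring
          rw [hc2]
        rw [hadec, hlstdec]
        exact ih4.append (List.Perm.refl _)

lemma best_spec (g : Nat → Int) : ∀ m : Nat, ∃ b : Nat, b ≤ m ∧
    ((List.range' 1 m).foldl
      (fun (s : Int × Int) k => if g k < s.2 then ((k : Int), g k) else s)
      (0, g 0)) = ((b : Int), g b) ∧
    (∀ k, k ≤ m → g b ≤ g k) ∧
    (∀ k, k < b → g b < g k) := by
  intro m
  induction m with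
  | zero =>
    refine ⟨0, le_refl _, rfl, ?_, fun k hk => absurd hk (by omega)⟩
    intro k hk
    rw [Nat.le_zero.mp hk]
  | succ m ih =>
    obtain ⟨b, hbm, hfold, hmin, hlt⟩ := ih
    rw [List.range'_1_concat, List.foldl_append, hfold]
    simp only [List.foldl_cons, List.foldl_nil]
    by_cases hc : g (1+m) < g b
    · refine ⟨1+m, by omega, by rw [if_pos hc], ?_, ?_⟩
      · intro k hk
        rcases Nat.lt_or_ge k (m+1) with hk' | hk'
        · exact le_of_lt (lt_of_lt_of_le hc (hmin k (by omega)))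
        · have : k = 1+m := by omega
          rw [this]
      · intro k hk
        exact lt_of_lt_of_le hc (hmin k (by omega))
    · refine ⟨b, by omega, by rw [if_neg hc], ?_, hlt⟩
      intro k hk
      rcases Nat.lt_or_ge k (m+1) with hk' | hk'
      · exact hmin k (by omega)
      · have : k = 1+m := by omega
        rw [this]
        omega

lemma xs_mono (xs : List Int)
    (hdec : ∀ k, k + 1 < xs.length → xs.getD (k+1) 0 < xs.getD k 0) :
    ∀ i j, i < j → j < xs.length → xs.getD j 0 < xs.getD i 0 := by
  intro i j
  induction j with
  | zero => omega
  | succ j ih =>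
    intro hij hj
    rcases Nat.lt_or_ge i j with h | h
    · exact lt_trans (hdec j hj) (ih h (by omega))
    · have : i = j := by omega
      rw [this]
      exact hdec j hj

lemma lodSearch_eq (xs : List Int) (G : Int) (b : Nat)
    (hdec : ∀ k, k + 1 < xs.length → xs.getD (k+1) 0 < xs.getD k 0)
    (hb : b < xs.length)
    (hmin : ∀ k, k < xs.length → |xs.getD b 0 - G| ≤ |xs.getD k 0 - G|)
    (hlt : ∀ k, k < b → |xs.getD b 0 - G| < |xs.getD k 0 - G|) :
    ∀ N : Nat, ∀ left right : Int, (right - left).toNat ≤ N →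
    0 ≤ left → left ≤ (b : Int) → (b : Int) ≤ right → right ≤ (xs.length : Int) - 1 →
    lodSearch xs G left right = ((b : Int) + 1, |xs.getD b 0 - G|) := by
  have hmono := xs_mono xs hdec
  intro N
  induction N with
  | zero =>
    intro left right hN h0 hlb hbr hrn
    have hlr : left = right := by omega
    have hbl : (b : Int) = left := by omega
    rw [lodSearch, dif_neg (by omega)]
    have htn : left.toNat = b := by omega
    have hrt : right.toNat = b := by omega
    split_ifs
    · show (left + 1, |xs.getD left.toNat 0 - G|) = ((b : Int) + 1, |xs.getD b 0 - G|)
      rw [htn, show ((b : Int)) = left from by omega]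
    · show (right + 1, |xs.getD right.toNat 0 - G|) = ((b : Int) + 1, |xs.getD b 0 - G|)
      rw [hrt, show ((b : Int)) = right from by omega]
  | succ N ihN =>
    intro left right hN h0 hlb hbr hrn
    by_cases h : left < right - 1
    · rw [lodSearch, dif_pos h]
      have hm := lodSearch_mid left right h
      set mid := PySem.Int.floordiv (left + right) 2 with hmid
      have hm0 : 0 ≤ mid := by omega
      have hmcast : (mid.toNat : Int) = mid := by omega
      have hmN : mid.toNat < xs.length := by omega
      by_cases h1 : xs.getD mid.toNat 0 = G
      · rw [if_pos h1]
        have hgb : |xs.getD b 0 - G| = 0 := by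
          have h2 := hmin mid.toNat hmN
          rw [h1] at h2
          simp only [sub_self, abs_zero] at h2
          exact le_antisymm h2 (abs_nonneg _)
        have hxb : xs.getD b 0 = G := by
          have := abs_eq_zero.mp hgb
          omega
        have hbm : b = mid.toNat := by
          rcases Nat.lt_trichotomy b mid.toNat with hc | hc | hc
          · have := hmono b mid.toNat hc hmN
            omega
          · exact hc
          · have := hmono mid.toNat b hc hb
            omega
        rw [hgb, hbm, hmcast]
      · rw [if_neg h1]
        by_cases h2 : xs.getD mid.toNat 0 < G
        · rw [if_pos h2]
          have hble : (b : Int) ≤ mid := by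
            by_contra hc
            push_neg at hc
            have hmb : mid.toNat < b := by omega
            have hlt1 := hmono mid.toNat b hmb hb
            have e1 : |xs.getD mid.toNat 0 - G| = G - xs.getD mid.toNat 0 := by
              rw [abs_of_neg (by omega)]; ring
            have e2 : |xs.getD b 0 - G| = G - xs.getD b 0 := by
              rw [abs_of_neg (by omega)]; ring
            have := hmin mid.toNat hmN
            omega
          exact ihN left mid (by omega) h0 hlb hble (by omega)
        · rw [if_neg h2]
          have hgm : G < xs.getD mid.toNat 0 := by
            rcases lt_trichotomy (xs.getD mid.toNat 0) G with hc | hc | hc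
            · exact absurd hc h2
            · exact absurd hc h1
            · exact hc
          have hmle : mid ≤ (b : Int) := by
            by_contra hc
            push_neg at hc
            have hbm : b < mid.toNat := by omega
            have hlt1 := hmono b mid.toNat hbm hmN
            have e1 : |xs.getD mid.toNat 0 - G| = xs.getD mid.toNat 0 - G := by
              rw [abs_of_pos (by omega)]
            have e2 : |xs.getD b 0 - G| = xs.getD b 0 - G := by
              rw [abs_of_pos (by omega)]
            have := hmin mid.toNat hmN
            omega
          exact ihN mid right (by omega) (by omega) hmle hbr hrn
    · rw [lodSearch, dif_neg h]
      have hrN : right.toNat < xs.length := by omega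
      have hlN : left.toNat < xs.length := by omega
      split_ifs with hc
      · have hbl : (b : Int) = left := by
          by_contra hne
          have hbr' : (b : Int) = right := by omega
          have hlr : left < right := by omega
          have hlb' : left.toNat < b := by omega
          have h3 := hlt left.toNat hlb'
          have hrb : right.toNat = b := by omega
          rw [hrb] at hc
          omega
        show (left + 1, |xs.getD left.toNat 0 - G|) = ((b : Int) + 1, |xs.getD b 0 - G|)
        have htn : left.toNat = b := by omega
        rw [htn, hbl]
      · push_neg at hc
        have hbr' : (b : Int) = right := by
          by_contra hne
          have hbl : (b : Int) = left := by omega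
          have hlb' : left.toNat = b := by omega
          have := hmin right.toNat hrN
          rw [hlb'] at hc
          omega
        show (right + 1, |xs.getD right.toNat 0 - G|) = ((b : Int) + 1, |xs.getD b 0 - G|)
        have htn : right.toNat = b := by omega
        rw [htn, hbr']

theorem line_of_delivery_main : ∀ (G : Int) (lst : List Int), lst ≠ [] →
    line_of_delivery G lst = line_of_delivery_alt G lst := by
  intro G lst hnil
  have hn : 0 < lst.length := List.length_pos_iff.mpr hnil
  have hperm : (PySem.List.sorted (yofF lst 0) (fun x => x) true).Perm (yofF lst 0) :=
    PySem.List.sorted_perm _ _ _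
  have hyl : (PySem.List.sorted (yofF lst 0) (fun x => x) true).length = lst.length := by
    rw [hperm.length_eq, yofF_length]
  -- the sorted list is nonempty
  obtain ⟨y0, t, hyscons⟩ : ∃ y0 t, PySem.List.sorted (yofF lst 0) (fun x => x) true = y0 :: t := by
    cases hc : PySem.List.sorted (yofF lst 0) (fun x => x) true with
    | nil =>
      rw [hc] at hyl
      simp at hyl
      omega
    | cons y0 t => exact ⟨y0, t, rfl⟩
  -- characterize lodResolve lst
  obtain ⟨hr1, _, hr3, hr4⟩ := lodResolve_aux lst (lst.length - 1) (by omega)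
  have hm1 : lst.length - 1 + 1 = lst.length := by omega
  rw [hm1] at hr4
  have hrdef : lodResolve lst = (List.range' 1 (lst.length - 1)).foldl
      (fun a i =>
        if a.getD (i - 1) 0 ≤ a.getD i 0 then
          lodInner (a.set i (a.getD (i - 1) 0 - 1)) (i - 1) (a.getD i 0 - a.getD (i - 1) 0 + 1)
        else a)
      lst := rfl
  rw [← hrdef] at hr1 hr3 hr4
  have htk1 : (lodResolve lst).take lst.length = lodResolve lst := by
    rw [← hr1, List.take_length]
  have htk2 : lst.take lst.length = lst := List.take_length
  rw [htk1, htk2] at hr4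
  -- yofF (lodResolve lst) 0 = the sorted list
  have hpw : (yofF (lodResolve lst) 0).Pairwise (fun a b : Int => b ≤ a) := by
    apply List.IsChain.pairwise
    apply List.isChain_iff_getElem.mpr
    intro i hi
    have hilen : i + 1 < lst.length := by
      rw [yofF_length, hr1] at hi
      omega
    have h1 := yofF_getD (lodResolve lst) 0 (i+1) (by omega)
    have h2 := yofF_getD (lodResolve lst) 0 i (by omega)
    have h3 := hr3 i (by omega)
    rw [List.getD_eq_getElem _ _ (by rw [yofF_length]; omega)] at h1 h2
    push_cast at h1 h2 h3
    omega
  have hpws : (PySem.List.sorted (yofF lst 0) (fun x => x) true).Pairwise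
      (fun a b : Int => b ≤ a) := by
    have := PySem.List.sorted_pairwise_rev (xs := yofF lst 0) (key := fun x => x)
    simpa using this
  have hyr : yofF (lodResolve lst) 0 = PySem.List.sorted (yofF lst 0) (fun x => x) true :=
    List.Perm.eq_of_pairwise' hpw hpws (hr4.trans hperm.symm)
  -- elementwise description of lodResolve lst
  have hrk : ∀ k, k < lst.length →
      (lodResolve lst).getD k 0 =
        (PySem.List.sorted (yofF lst 0) (fun x => x) true).getD k 0 - (k : Int) := by
    intro k hk
    have h1 := yofF_getD (lodResolve lst) 0 k (by omega)
    rw [hyr] at h1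
    push_cast at h1
    omega
  have hdec : ∀ k, k + 1 < (lodResolve lst).length →
      (lodResolve lst).getD (k+1) 0 < (lodResolve lst).getD k 0 := by
    intro k hk
    rw [hr1] at hk
    have := hr3 k (by omega)
    push_cast at this
    omega
  -- B's argmin scan
  obtain ⟨b, hbm, hfold, hminb, hltb⟩ :=
    best_spec (fun k => |(PySem.List.sorted (yofF lst 0) (fun x => x) true).getD k 0 - (k : Int) - G|)
      (lst.length - 1)
  have hblt : b < lst.length := by omega
  -- transfer minimality to lodResolve lst
  have hminr : ∀ k, k < (lodResolve lst).length →
      |(lodResolve lst).getD b 0 - G| ≤ |(lodResolve lst).getD k 0 - G| := by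
    intro k hk
    rw [hr1] at hk
    rw [hrk b hblt, hrk k hk]
    have := hminb k (by omega)
    calc |(PySem.List.sorted (yofF lst 0) (fun x => x) true).getD b 0 - ↑b - G|
        ≤ _ := this
      _ = _ := by ring_nf
  have hltr : ∀ k, k < b →
      |(lodResolve lst).getD b 0 - G| < |(lodResolve lst).getD k 0 - G| := by
    intro k hk
    rw [hrk b hblt, hrk k (by omega)]
    have := hltb k hk
    calc |(PySem.List.sorted (yofF lst 0) (fun x => x) true).getD b 0 - ↑b - G|
        < _ := this
      _ = _ := by ring_nf
  -- evaluate A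
  have hA : line_of_delivery G lst = ((b : Int) + 1, |(lodResolve lst).getD b 0 - G|) := by
    rw [line_of_delivery]
    refine lodSearch_eq (lodResolve lst) G b hdec (by omega) hminr hltr
      (((lst.length : Int) - 1).toNat) 0 ((lst.length : Int) - 1) (by omega) (by omega)
      (by omega) (by omega) (by rw [hr1])
  -- evaluate B
  have hB : line_of_delivery_alt G lst =
      ((b : Int) + 1,
        |(PySem.List.sorted (yofF lst 0) (fun x => x) true).getD b 0 - (b : Int) - G|) := by
    rw [line_of_delivery_alt]
    have hy : lst.zipIdx.map (fun p => p.1 + (p.2 : Int)) = yofF lst 0 := rfl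
    simp only [hy, hyscons]
    have hlen : (y0 :: t).length - 1 = lst.length - 1 := by
      rw [← hyscons, hyl]
    rw [hlen]
    have hinit : ((0 : Int), |y0 - G|) =
        ((0 : Int), |(PySem.List.sorted (yofF lst 0) (fun x => x) true).getD 0 0 - ((0:Nat) : Int) - G|) := by
      rw [hyscons]
      norm_num
    rw [← hyscons, hinit, hfold]
  rw [hA, hB, hrk b hblt]

-- ===== VERDICT (by name: the statement is the Claim_ definition above) =====
theorem line_of_delivery_spec : Claim_equal_line_of_delivery := by
  intro G lst _ hpre
  unfold Spec_line_of_delivery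
  exact line_of_delivery_main G lst hpre
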